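-- pv_equiv track=rewrite | github.com/pravalikavis/Python-Mrnd-Exercises | mocktest1_probem1.py | get_right_rotations
-- ===== SOURCE A (Python) =====
-- def get_right_rotations(str1, str2):
--     if str1==None:
--         return -1
--     if(str1==str2):
--         return 0
--     i=len(str1)
--     l=0
--     for j in range(1,i):
--         l+=1
--         str1=str1[-j]+str1
--         if(str1[:-j]==str2):
--          return l
--     return -1
-- ===== SOURCE B (Python) =====
-- def get_right_rotations(str1, str2):
--     # Same result as A; O(n) via substring search in str2 doubled instead of rebuilding rotations.
--     if str1 is None:
--         return -1
--     if str1 == str2: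
--         return 0
--     if len(str1) != len(str2):
--         return -1
--     j = (str2 + str2).find(str1)
--     return j if j > 0 else -1
-- ===== Notes on version B (the rewrite author's own statement) =====
-- stated objective: faster
-- what changed: B replaces A's loop that rebuilds a growing rotated string each step (quadratic string concatenation) with a single substring search of str1 in str2+str2 (the offset of the first occurrence is the rotation count).
import Mathlib
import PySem

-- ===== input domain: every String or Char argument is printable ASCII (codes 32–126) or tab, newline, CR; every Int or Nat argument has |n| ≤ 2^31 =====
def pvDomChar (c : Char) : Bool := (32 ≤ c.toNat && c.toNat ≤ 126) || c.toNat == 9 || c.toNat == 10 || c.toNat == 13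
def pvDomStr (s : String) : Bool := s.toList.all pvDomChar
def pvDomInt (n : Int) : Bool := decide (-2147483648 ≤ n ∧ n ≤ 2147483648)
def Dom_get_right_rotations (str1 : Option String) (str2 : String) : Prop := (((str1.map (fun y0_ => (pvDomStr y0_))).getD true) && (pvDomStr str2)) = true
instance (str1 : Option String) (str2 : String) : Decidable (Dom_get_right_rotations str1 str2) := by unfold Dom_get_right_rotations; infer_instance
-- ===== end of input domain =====

-- B replaces A's loop that rebuilds a growing rotated string each step with a single
-- substring search of str1 in str2+str2; exact same return value on every input.

-- ===== PORT A =====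
-- A's for-loop over range(1, i) carrying the mutating variables str1 (the growing string)
-- and l (incremented at the top of each iteration, so the value compared/returned is l + 1).
-- The 'none' branch of pyGet? is Python's IndexError; it is unreachable here (the string
-- grows by one char per step, so index -j stays in range whenever the loop body runs).
def grrLoopA (t : List Char) : List Int → List Char → Int → Int
  | [], _, _ => -1
  | j :: rest, s1, l =>
      match PySem.List.pyGet? s1 (-j) with
      | none => -1
      | some c =>
          if PySem.List.slice (c :: s1) none (some (-j)) = t then l + 1
          else grrLoopA t rest (c :: s1) (l + 1)

def get_right_rotations (str1 : Option String) (str2 : String) : Int :=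
  match str1 with
  | none => -1
  | some s =>
      if s = str2 then 0
      else grrLoopA str2.toList (PySem.List.pyRange 1 (PySem.Str.len s) 1) s.toList 0

-- ===== PORT B =====
def get_right_rotations_alt (str1 : Option String) (str2 : String) : Int :=
  match str1 with
  | none => -1
  | some s =>
      if s = str2 then 0
      else if PySem.Str.len s ≠ PySem.Str.len str2 then -1
      else
        let j := PySem.Chars.find (str2.toList ++ str2.toList) s.toList
        if j > 0 then j else -1

-- ===== PRECONDITION & SPEC =====
def Spec_get_right_rotations (str1 : Option String) (str2 : String) (out : Int) : Prop := out = get_right_rotations_alt str1 str2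
instance (str1 : Option String) (str2 : String) (out : Int) : Decidable (Spec_get_right_rotations str1 str2 out) := by unfold Spec_get_right_rotations; infer_instance

-- ===== CLAIM (what is proved, stated in full; the proofs are below) =====
def Claim_equal_get_right_rotations : Prop := ∀ (str1 : Option String) (str2 : String), Dom_get_right_rotations str1 str2 → Spec_get_right_rotations str1 str2 (get_right_rotations str1 str2)

-- ===== LEMMAS AND PROOFS =====

-- "first k in [j, s.length) whose right rotation of s equals t, else -1"
def firstRot (s t : List Char) (j : Nat) : Int :=
  if _h : j < s.length then
    if s.drop (s.length - j) ++ s.take (s.length - j) = t then (j : Int)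
    else firstRot s t (j + 1)
  else -1
termination_by s.length - j

theorem firstRot_none (s t : List Char) :
    ∀ (fuel j : Nat), s.length - j = fuel →
    (∀ k, j ≤ k → k < s.length → s.drop (s.length - k) ++ s.take (s.length - k) ≠ t) →
    firstRot s t j = -1 := by
  intro fuel
  induction fuel with
  | zero =>
      intro j hf _
      rw [firstRot, dif_neg (by omega)]
  | succ m ih =>
      intro j hf h
      have hjl : j < s.length := by omega
      rw [firstRot, dif_pos hjl, if_neg (h j le_rfl hjl)]
      exact ih (j + 1) (by omega) (fun k hk1 hk2 => h k (by omega) hk2)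

theorem firstRot_hit (s t : List Char) :
    ∀ (fuel j m : Nat), m - j = fuel → j ≤ m → m < s.length →
    s.drop (s.length - m) ++ s.take (s.length - m) = t →
    (∀ k, j ≤ k → k < m → s.drop (s.length - k) ++ s.take (s.length - k) ≠ t) →
    firstRot s t j = (m : Int) := by
  intro fuel
  induction fuel with
  | zero =>
      intro j m hf hjm hm hP _
      have hj : j = m := by omega
      subst hj
      rw [firstRot, dif_pos hm, if_pos hP]
  | succ d ih =>
      intro j m hf hjm hm hP hmin
      have hjm' : j < m := by omega
      rw [firstRot, dif_pos (by omega), if_neg (hmin j le_rfl hjm')]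
      exact ih (j + 1) m (by omega) (by omega) hm hP
        (fun k hk1 hk2 => hmin k (by omega) hk2)

theorem grrLoopA_eq_firstRot (s t : List Char) :
    ∀ (fuel j : Nat), s.length - j = fuel → 1 ≤ j → j ≤ s.length →
    grrLoopA t (PySem.List.pyRange (j : Int) (s.length : Int) 1)
      (s.drop (s.length - j + 1) ++ s) ((j : Int) - 1) = firstRot s t j := by
  intro fuel
  induction fuel with
  | zero =>
      intro j hf h1 h2
      have hj : j = s.length := by omega
      rw [PySem.List.pyRange_one_eq_nil (by exact_mod_cast hj.ge)]
      rw [firstRot, dif_neg (by omega)]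
      rfl
  | succ m ih =>
      intro j hf h1 h2
      have hjn : j < s.length := by omega
      rw [PySem.List.pyRange_one_cons (by exact_mod_cast hjn)]
      simp only [grrLoopA]
      have hL : (s.drop (s.length - j + 1) ++ s).length = (j - 1) + s.length := by
        simp only [List.length_append, List.length_drop]; omega
      rw [PySem.List.pyGet?_neg_natCast _ j h1 (by omega)]
      have hidx : (s.drop (s.length - j + 1) ++ s).length - j = s.length - 1 := by omega
      rw [hidx, List.getElem?_append_right (by simp only [List.length_drop]; omega)]
      have hidx2 : s.length - 1 - (s.drop (s.length - j + 1)).length = s.length - j := by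
        simp only [List.length_drop]; omega
      rw [hidx2, List.getElem?_eq_getElem (by omega)]
      dsimp only
      have hcons : s[s.length - j] :: (s.drop (s.length - j + 1) ++ s)
          = s.drop (s.length - j) ++ s := by
        rw [List.drop_eq_getElem_cons (by omega : s.length - j < s.length)]
        rfl
      have hslice : PySem.List.slice (s[s.length - j] :: (s.drop (s.length - j + 1) ++ s))
          none (some (-(j : Int))) = s.drop (s.length - j) ++ s.take (s.length - j) := by
        rw [hcons, PySem.List.slice_to_neg_natCast _ j h1]
        have hlen2 : (s.drop (s.length - j) ++ s).length - j = s.length := by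
          simp only [List.length_append, List.length_drop]; omega
        have hdj : (s.drop (s.length - j)).length = j := by
          simp only [List.length_drop]; omega
        rw [hlen2, List.take_append, List.take_of_length_le (by omega), hdj]
      rw [hslice]
      by_cases hP : s.drop (s.length - j) ++ s.take (s.length - j) = t
      · rw [if_pos hP, firstRot, dif_pos hjn, if_pos hP]
        omega
      · rw [if_neg hP, firstRot, dif_pos hjn, if_neg hP]
        have hstate : s[s.length - j] :: (s.drop (s.length - j + 1) ++ s)
            = s.drop (s.length - (j + 1) + 1) ++ s := by
          rw [hcons]
          congr 2
          omega
        have hcast : ((j : Int) + 1) = ((j + 1 : Nat) : Int) := by push_cast; ring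
        have hl : ((j : Int) - 1) + 1 = ((j + 1 : Nat) : Int) - 1 := by push_cast; ring
        rw [hstate, hcast, hl]
        exact ih (j + 1) (by omega) (by omega) (by omega)

-- rotation characterisation: right-rotating s by k gives t ↔ s is t left-rotated by k
theorem rot_eq_iff (s t : List Char) (k : Nat) (hk : k ≤ s.length) (hlen : s.length = t.length) :
    (s.drop (s.length - k) ++ s.take (s.length - k) = t) ↔ s = t.drop k ++ t.take k := by
  have hdl : (s.drop (s.length - k)).length = k := by
    simp only [List.length_drop]; omega
  constructor
  · intro h
    have h1 : t.drop k = s.take (s.length - k) := by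
      rw [← h, List.drop_left' hdl]
    have h2 : t.take k = s.drop (s.length - k) := by
      rw [← h, List.take_left' hdl]
    rw [h1, h2, List.take_append_drop]
  · intro h
    obtain ⟨n', hn'⟩ : ∃ n', s.length - k = n' := ⟨_, rfl⟩
    have hu : (t.drop k).length = n' := by
      simp only [List.length_drop]; omega
    rw [hn', h, List.drop_left' hu, List.take_left' hu, List.take_append_drop]

theorem prefix_drop_iff (s t : List Char) (k : Nat) (hk : k ≤ t.length)
    (hlen : s.length = t.length) :
    s <+: (t ++ t).drop k ↔ s = t.drop k ++ t.take k := by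
  rw [List.prefix_iff_eq_take]
  have hd : (t ++ t).drop k = t.drop k ++ t := by
    rw [List.drop_append, Nat.sub_eq_zero_of_le hk, List.drop_zero]
  rw [hd, hlen, List.take_append, List.take_of_length_le (by simp only [List.length_drop]; omega)]
  have h1 : t.length - (t.drop k).length = k := by
    simp only [List.length_drop]; omega
  rw [h1]

theorem firstRot_eq_find (s t : List Char) (hlen : s.length = t.length) (hne : s ≠ t)
    (hpos : 0 < s.length) :
    firstRot s t 1 =
      (if PySem.Chars.find (t ++ t) s > 0 then PySem.Chars.find (t ++ t) s else -1) := by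
  set F := PySem.Chars.find (t ++ t) s with hF
  rcases lt_or_ge F 0 with hneg | hnn
  · -- no occurrence: no rotation matches
    have hF1 : F = -1 := le_antisymm (by omega) (PySem.Chars.neg_one_le_find _ _)
    have hnotin : ¬ s <:+: (t ++ t) := (PySem.Chars.find_eq_neg_one_iff _ _).mp hF1
    rw [if_neg (by omega)]
    apply firstRot_none s t (s.length - 1) 1 rfl
    intro k hk1 hk2 hPk
    apply hnotin
    rw [← PySem.Chars.isIn_iff_infix, ← PySem.Chars.exists_prefix_drop_iff_isIn]
    exact ⟨k, (prefix_drop_iff s t k (by omega) hlen).mpr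
      ((rot_eq_iff s t k (by omega) hlen).mp hPk)⟩
  · -- first occurrence at F.toNat
    obtain ⟨hpre, hmin⟩ := PySem.Chars.find_spec (sub := s) (s := t ++ t) hnn
    set m := F.toNat with hm
    have hFm : F = (m : Int) := by omega
    have hmle : m ≤ t.length := by
      have := hpre.length_le
      simp at this
      omega
    have hm0 : m ≠ 0 := by
      intro h0
      apply hne
      have := (prefix_drop_iff s t m hmle hlen).mp hpre
      simp [h0] at this
      exact this
    have hmn : m ≠ t.length := by
      intro h0
      apply hne
      have := (prefix_drop_iff s t m hmle hlen).mp hpre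
      simp [h0] at this
      exact this
    rw [if_pos (by omega), hFm]
    apply firstRot_hit s t (m - 1) 1 m rfl (by omega) (by omega)
    · exact (rot_eq_iff s t m (by omega) hlen).mpr ((prefix_drop_iff s t m hmle hlen).mp hpre)
    · intro k hk1 hk2 hPk
      exact hmin k hk2 ((prefix_drop_iff s t k (by omega) hlen).mpr
        ((rot_eq_iff s t k (by omega) hlen).mp hPk))

-- ===== VERDICT (by name: the statement is the Claim_ definition above) =====
theorem get_right_rotations_spec : Claim_equal_get_right_rotations := by
  intro str1 str2 _
  unfold Spec_get_right_rotations get_right_rotations get_right_rotations_alt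
  cases str1 with
  | none => rfl
  | some s =>
    dsimp only
    by_cases heq : s = str2
    · rw [if_pos heq, if_pos heq]
    · rw [if_neg heq, if_neg heq]
      have hne : s.toList ≠ str2.toList := fun h => heq (String.toList_inj.mp h)
      by_cases hlen : s.toList.length = str2.toList.length
      · -- equal lengths: A's loop equals the substring search
        have hpos : 0 < s.toList.length := by
          by_contra hc
          apply hne
          rw [List.eq_nil_of_length_eq_zero (by omega : s.toList.length = 0),
            List.eq_nil_of_length_eq_zero (by omega : str2.toList.length = 0)]
        rw [if_neg (by simp only [PySem.Str.len_eq, ne_eq, Nat.cast_inj]; omega)]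
        have hA := grrLoopA_eq_firstRot s.toList str2.toList (s.toList.length - 1) 1
          rfl le_rfl hpos
        simp only [Nat.cast_one, sub_self] at hA
        have hs : s.toList.drop (s.toList.length - 1 + 1) ++ s.toList = s.toList := by
          have h11 : s.toList.length - 1 + 1 = s.toList.length := by omega
          rw [h11, List.drop_length, List.nil_append]
        rw [hs] at hA
        show grrLoopA str2.toList (PySem.List.pyRange 1 (s.toList.length : Int) 1) s.toList 0
          = if PySem.Chars.find (str2.toList ++ str2.toList) s.toList > 0
            then PySem.Chars.find (str2.toList ++ str2.toList) s.toList else -1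
        rw [hA, firstRot_eq_find s.toList str2.toList hlen hne hpos]
      · -- length mismatch: every comparison in A's loop fails, B's length guard fires
        rw [if_pos (by simp only [PySem.Str.len_eq, ne_eq, Nat.cast_inj]; omega)]
        show grrLoopA str2.toList (PySem.List.pyRange 1 (s.toList.length : Int) 1) s.toList 0 = -1
        rcases Nat.eq_zero_or_pos s.toList.length with h0 | hpos
        · rw [h0]
          have hnil : PySem.List.pyRange 1 ((0 : Nat) : Int) 1 = [] :=
            PySem.List.pyRange_one_eq_nil (by norm_num)
          rw [hnil]
          rfl
        · have hA := grrLoopA_eq_firstRot s.toList str2.toList (s.toList.length - 1) 1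
            rfl le_rfl hpos
          simp only [Nat.cast_one, sub_self] at hA
          have hs : s.toList.drop (s.toList.length - 1 + 1) ++ s.toList = s.toList := by
            have h11 : s.toList.length - 1 + 1 = s.toList.length := by omega
            rw [h11, List.drop_length, List.nil_append]
          rw [hs] at hA
          rw [hA]
          apply firstRot_none s.toList str2.toList (s.toList.length - 1) 1 rfl
          intro k _ hk2 hPk
          apply hlen
          rw [← hPk]
          simp only [List.length_append, List.length_drop, List.length_take]
          omega
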